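-- pv_equiv track=rewrite | github.com/Herbert-Fountain/Senolytic-Logic-Gates | modeling/core/protocol.py | auto_assign_plate
-- ===== SOURCE A (Python) =====
-- def auto_assign_plate(groups, cell_types, replicates=3):
--     """Auto-assign wells to groups and cell types.
--
--     Layout: each group gets a column, replicates fill down rows.
--     Cell types get separate blocks of columns. When columns are
--     exhausted, wraps to the next block of rows.
--
--     Returns
--     -------
--     plate_mrna, plate_cells : lists of 96 ints
--     """
--     plate_mrna = [-1] * 96
--     plate_cells = [-1] * 96
--
--     col = 0
--     row_offset = 0
--
--     for ct_idx in range(len(cell_types)):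
--         for g_idx in range(len(groups)):
--             if col >= 12:
--                 col = 0
--                 row_offset += replicates
--             for rep in range(replicates):
--                 row = row_offset + rep
--                 if row < 8 and col < 12:
--                     well_idx = row * 12 + col
--                     plate_mrna[well_idx] = g_idx
--                     plate_cells[well_idx] = ct_idx
--             col += 1
--
--     return plate_mrna, plate_cells
-- ===== SOURCE B (Python) =====
-- def auto_assign_plate(groups, cell_types, replicates=3):
--     """Auto-assign wells to groups and cell types.
--
--     Flat re-formulation: each (cell type, group) pair has a single
--     linear index n; its column and row block follow from n by
--     divmod, so no mutable col/row_offset is carried between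
--     iterations, and the replicate loop is clipped to the plate's
--     8 rows up front instead of guarding every write.
--     """
--     plate_mrna = [-1] * 96
--     plate_cells = [-1] * 96
--     G = len(groups)
--     for n in range(len(cell_types) * G):
--         ct_idx, g_idx = divmod(n, G)
--         block, col = divmod(n, 12)
--         row_offset = block * replicates
--         for rep in range(max(0, min(replicates, 8 - row_offset))):
--             well_idx = (row_offset + rep) * 12 + col
--             plate_mrna[well_idx] = g_idx
--             plate_cells[well_idx] = ct_idx
--     return plate_mrna, plate_cells
-- ===== Notes on version B (the rewrite author's own statement) =====
-- stated objective: alternative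
-- what changed: Replaces the nested ct/group loops with mutable col/row_offset state by one flat loop over the linear pair index n, deriving column and row block from n by divmod and clipping the replicate loop to the 8 plate rows up front instead of guarding every write.
import Mathlib
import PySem

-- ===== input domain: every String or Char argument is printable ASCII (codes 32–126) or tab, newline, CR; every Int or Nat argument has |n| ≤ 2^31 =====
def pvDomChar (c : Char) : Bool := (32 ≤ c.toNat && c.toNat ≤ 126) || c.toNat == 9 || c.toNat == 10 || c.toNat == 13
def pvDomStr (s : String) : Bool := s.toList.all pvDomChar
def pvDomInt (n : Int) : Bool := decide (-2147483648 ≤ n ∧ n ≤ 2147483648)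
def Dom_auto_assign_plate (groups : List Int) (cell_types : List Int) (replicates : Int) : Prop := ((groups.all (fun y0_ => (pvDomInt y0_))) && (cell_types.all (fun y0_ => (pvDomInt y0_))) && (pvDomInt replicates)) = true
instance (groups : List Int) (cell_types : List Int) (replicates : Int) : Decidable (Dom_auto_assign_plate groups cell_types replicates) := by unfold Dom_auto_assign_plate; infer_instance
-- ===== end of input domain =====

-- B replaces A's nested loops with carried mutable col/row_offset by one flat loop
-- over the linear pair index, deriving col/row block by divmod (objective: alternative decomposition).


-- ===== PORT A =====
-- the 'for rep in range(replicates)' loop with its guard and two plate writes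
def pvRepLoopA (replicates g ct col ro : Int) (p : List Int × List Int) : List Int × List Int :=
  (PySem.List.pyRange 0 replicates 1).foldl (fun p rep =>
    let row := ro + rep
    if row < 8 ∧ col < 12 then
      let w := row * 12 + col
      (PySem.List.pySetD p.1 w g, PySem.List.pySetD p.2 w ct)
    else p) p

-- one inner-loop body: wrap check, replicate loop, col increment; state = (plates, col, row_offset)
def pvGroupStepA (replicates ct g : Int) (st : (List Int × List Int) × Int × Int) :
    (List Int × List Int) × Int × Int :=
  let cr : Int × Int := if st.2.1 ≥ 12 then (0, st.2.2 + replicates) else (st.2.1, st.2.2)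
  (pvRepLoopA replicates g ct cr.1 cr.2 st.1, cr.1 + 1, cr.2)

def auto_assign_plate (groups : List Int) (cell_types : List Int) (replicates : Int) : List Int × List Int :=
  ((PySem.List.pyRange 0 (cell_types.length : Int) 1).foldl (fun st ct_idx =>
    (PySem.List.pyRange 0 (groups.length : Int) 1).foldl (fun st g_idx =>
      pvGroupStepA replicates ct_idx g_idx st) st)
    ((List.replicate 96 (-1), List.replicate 96 (-1)), 0, 0)).1

-- ===== PORT B =====
-- body of B's flat loop: derive everything from the linear index n, clip the replicate loop
def pvWriteB (replicates G n : Int) (p : List Int × List Int) : List Int × List Int :=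
  let ct := PySem.Int.floordiv n G
  let g := PySem.Int.mod n G
  let block := PySem.Int.floordiv n 12
  let col := PySem.Int.mod n 12
  let ro := block * replicates
  (PySem.List.pyRange 0 (max 0 (min replicates (8 - ro))) 1).foldl (fun p rep =>
    let w := (ro + rep) * 12 + col
    (PySem.List.pySetD p.1 w g, PySem.List.pySetD p.2 w ct)) p

def auto_assign_plate_alt (groups : List Int) (cell_types : List Int) (replicates : Int) : List Int × List Int :=
  (PySem.List.pyRange 0 ((cell_types.length : Int) * (groups.length : Int)) 1).foldl
    (fun p n => pvWriteB replicates (groups.length : Int) n p)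
    (List.replicate 96 (-1), List.replicate 96 (-1))

-- ===== PRECONDITION & SPEC =====
def Spec_auto_assign_plate (groups : List Int) (cell_types : List Int) (replicates : Int) (out : List Int × List Int) : Prop := out = auto_assign_plate_alt groups cell_types replicates
instance (groups : List Int) (cell_types : List Int) (replicates : Int) (out : List Int × List Int) : Decidable (Spec_auto_assign_plate groups cell_types replicates out) := by unfold Spec_auto_assign_plate; infer_instance

-- ===== CLAIM (what is proved, stated in full; the proofs are below) =====
def Claim_equal_auto_assign_plate : Prop := ∀ (groups : List Int) (cell_types : List Int) (replicates : Int), Dom_auto_assign_plate groups cell_types replicates → Spec_auto_assign_plate groups cell_types replicates (auto_assign_plate groups cell_types replicates)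

-- ===== LEMMAS AND PROOFS =====

-- col value entering the n-th (linear) inner-loop body, before the wrap check
def pvColIn (n : Nat) : Int := if n = 0 then 0 else ((n - 1) % 12 : Nat) + 1
-- row_offset value entering the n-th (linear) inner-loop body
def pvRoIn (replicates : Int) (n : Nat) : Int := (((n - 1) / 12 : Nat) : Int) * replicates

-- flattened A: fold of the inner-loop body over linear indices
def pvAflat (replicates : Int) (G N : Nat) (st : (List Int × List Int) × Int × Int) :
    (List Int × List Int) × Int × Int :=
  (List.range N).foldl (fun st (n : Nat) => pvGroupStepA replicates ((n / G : Nat) : Int) ((n % G : Nat) : Int) st) st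

-- flattened B
def pvBflat (replicates : Int) (G N : Nat) (p : List Int × List Int) : List Int × List Int :=
  (List.range N).foldl (fun p (n : Nat) => pvWriteB replicates ((G : Nat) : Int) ((n : Nat) : Int) p) p

theorem pvFoldl_id {α β : Type} (f : β → α → β) (l : List α)
    (h : ∀ x ∈ l, ∀ s, f s x = s) : ∀ s, l.foldl f s = s := by
  induction l with
  | nil => intro s; rfl
  | cons a t ih =>
      intro s
      simp only [List.foldl_cons]
      rw [h a (by simp)]
      exact ih (fun x hx s => h x (by simp [hx]) s) s

theorem pvFoldl_ext {α β : Type} (f g : β → α → β) (l : List α)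
    (h : ∀ x ∈ l, ∀ s, f s x = g s x) : ∀ s, l.foldl f s = l.foldl g s := by
  induction l with
  | nil => intro s; rfl
  | cons a t ih =>
      intro s
      simp only [List.foldl_cons]
      rw [h a (by simp)]
      exact ih (fun x hx s => h x (by simp [hx]) s) _

-- the replicate loops agree when col = n % 12 and ro = (n / 12) * replicates
theorem pvRepLoop_eq (replicates g ct : Int) (b c : Nat) (hc : c < 12)
    (p : List Int × List Int) :
    pvRepLoopA replicates g ct (↑c) ((↑b) * replicates) p =
      (PySem.List.pyRange 0 (max 0 (min replicates (8 - (↑b) * replicates))) 1).foldl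
        (fun p rep =>
          let w := ((↑b) * replicates + rep) * 12 + (↑c : Int)
          (PySem.List.pySetD p.1 w g, PySem.List.pySetD p.2 w ct)) p := by
  unfold pvRepLoopA
  set ro : Int := (↑b) * replicates with hro
  by_cases hrep : replicates ≤ 0
  · rw [PySem.List.pyRange_one_eq_nil (a := 0) (b := replicates) (by omega),
      PySem.List.pyRange_one_eq_nil (a := 0) (b := max 0 (min replicates (8 - ro))) (by omega)]
    rfl
  · rw [not_le] at hrep
    have hro0 : 0 ≤ ro := by positivity
    set k : Int := max 0 (min replicates (8 - ro)) with hk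
    have hk0 : 0 ≤ k := by omega
    have hkr : k ≤ replicates := by omega
    rw [PySem.List.pyRange_one_append 0 k replicates hk0 hkr, List.foldl_append]
    have hfirst : ∀ s, (PySem.List.pyRange 0 k 1).foldl (fun p rep =>
        let row := ro + rep
        if row < 8 ∧ (↑c : Int) < 12 then
          let w := row * 12 + (↑c)
          (PySem.List.pySetD p.1 w g, PySem.List.pySetD p.2 w ct)
        else p) s =
        (PySem.List.pyRange 0 k 1).foldl (fun p rep =>
          let w := (ro + rep) * 12 + (↑c : Int)
          (PySem.List.pySetD p.1 w g, PySem.List.pySetD p.2 w ct)) s := by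
      apply pvFoldl_ext
      intro x hx s
      rw [PySem.List.mem_pyRange_one] at hx
      have hcond : ro + x < 8 ∧ (↑c : Int) < 12 := by
        constructor
        · omega
        · exact_mod_cast hc
      simp only [if_pos hcond]
    rw [hfirst]
    apply pvFoldl_id
    intro x hx s
    rw [PySem.List.mem_pyRange_one] at hx
    have hcond : ¬ (ro + x < 8 ∧ (↑c : Int) < 12) := by
      intro h
      omega
    simp only [if_neg hcond]

-- one flattened A step advances the invariant state and performs exactly B's writes
theorem pvStep_eq (replicates : Int) (G : Nat) (n : Nat)
    (p : List Int × List Int) :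
    pvGroupStepA replicates ((n / G : Nat) : Int) ((n % G : Nat) : Int) (p, pvColIn n, pvRoIn replicates n) =
      (pvWriteB replicates ((G : Nat) : Int) ((n : Nat) : Int) p, pvColIn (n + 1), pvRoIn replicates (n + 1)) := by
  have hcol : (if pvColIn n ≥ 12 then ((0 : Int), pvRoIn replicates n + replicates)
      else (pvColIn n, pvRoIn replicates n)) = ((↑(n % 12) : Int), (↑(n / 12) : Int) * replicates) := by
    unfold pvColIn pvRoIn
    by_cases h0 : n = 0
    · subst h0; norm_num
    · by_cases hw : ((n - 1) % 12 : Nat) = 11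
      · have hmod : n % 12 = 0 := by omega
        have hdiv : n / 12 = (n - 1) / 12 + 1 := by omega
        simp only [if_neg h0, hw, hmod, hdiv]
        rw [if_pos (by norm_num)]
        push_cast
        ring_nf
      · have hmod : n % 12 = (n - 1) % 12 + 1 := by omega
        have hdiv : n / 12 = (n - 1) / 12 := by omega
        simp only [if_neg h0, hmod, hdiv]
        rw [if_neg (by push_cast; omega)]
        push_cast
        ring_nf
  have hfd : PySem.Int.floordiv ((n : Nat) : Int) 12 = ((n / 12 : Nat) : Int) := by
    exact_mod_cast PySem.Int.floordiv_natCast n 12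
  have hmd : PySem.Int.mod ((n : Nat) : Int) 12 = ((n % 12 : Nat) : Int) := by
    exact_mod_cast PySem.Int.mod_natCast n 12
  unfold pvGroupStepA
  simp only [hcol]
  refine Prod.ext ?_ (Prod.ext ?_ ?_)
  · show pvRepLoopA replicates (↑(n % G)) (↑(n / G)) (↑(n % 12)) ((↑(n / 12)) * replicates) p =
      pvWriteB replicates (↑G) (↑n) p
    rw [pvRepLoop_eq replicates (↑(n % G)) (↑(n / G)) (n / 12) (n % 12)
      (Nat.mod_lt _ (by norm_num)) p]
    unfold pvWriteB
    simp only [PySem.Int.floordiv_natCast, PySem.Int.mod_natCast, hfd, hmd]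
  · show (↑(n % 12) : Int) + 1 = pvColIn (n + 1)
    unfold pvColIn
    simp only [Nat.add_sub_cancel, if_neg (Nat.succ_ne_zero n)]
  · show (↑(n / 12) : Int) * replicates = pvRoIn replicates (n + 1)
    unfold pvRoIn
    simp only [Nat.add_sub_cancel]

-- the flattened A fold tracks the closed-form state and B's plates
theorem pvAflat_eq (replicates : Int) (G : Nat) (N : Nat)
    (p : List Int × List Int) :
    pvAflat replicates G N (p, pvColIn 0, pvRoIn replicates 0) =
      (pvBflat replicates G N p, pvColIn N, pvRoIn replicates N) := by
  induction N with
  | zero => simp [pvAflat, pvBflat]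
  | succ m ih =>
      unfold pvAflat pvBflat at *
      rw [List.range_succ, List.foldl_append, List.foldl_append, ih]
      simp only [List.foldl_cons, List.foldl_nil]
      exact pvStep_eq replicates G m _

-- A's nested fold equals the flattened fold over linear indices
theorem pvNested_eq_flat (replicates : Int) (G : Nat) (hG : 0 < G) :
    ∀ (C : Nat) (st : (List Int × List Int) × Int × Int),
    (List.range C).foldl (fun st (ct : Nat) =>
      (List.range G).foldl (fun st (g : Nat) => pvGroupStepA replicates ((ct : Nat) : Int) ((g : Nat) : Int) st) st) st =
    pvAflat replicates G (C * G) st := by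
  intro C
  induction C with
  | zero => intro st; rw [Nat.zero_mul]; rfl
  | succ m ih =>
      intro st
      rw [List.range_succ, List.foldl_append]
      simp only [List.foldl_cons, List.foldl_nil]
      rw [ih]
      unfold pvAflat
      have hrange : List.range ((m + 1) * G) = List.range (m * G) ++ (List.range G).map (m * G + ·) := by
        rw [Nat.succ_mul, List.range_add]
      rw [hrange, List.foldl_append, List.foldl_map]
      apply pvFoldl_ext
      intro g hg s
      rw [List.mem_range] at hg
      have hdiv : (m * G + g) / G = m := by
        rw [Nat.mul_comm m G, Nat.mul_add_div hG, Nat.div_eq_of_lt hg, Nat.add_zero]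
      have hmod : (m * G + g) % G = g := by
        rw [Nat.mul_comm m G, Nat.mul_add_mod, Nat.mod_eq_of_lt hg]
      rw [hdiv, hmod]

-- ===== VERDICT (by name: the statement is the Claim_ definition above) =====
theorem auto_assign_plate_spec : Claim_equal_auto_assign_plate := by
  intro groups cell_types replicates _
  show auto_assign_plate groups cell_types replicates = auto_assign_plate_alt groups cell_types replicates
  unfold auto_assign_plate auto_assign_plate_alt
  have hinner : ∀ (st : (List Int × List Int) × Int × Int),
      (PySem.List.pyRange 0 (cell_types.length : Int) 1).foldl (fun st (ct : Int) =>
        (PySem.List.pyRange 0 (groups.length : Int) 1).foldl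
          (fun st g => pvGroupStepA replicates ct g st) st) st =
      (PySem.List.pyRange 0 (cell_types.length : Int) 1).foldl (fun st (ct : Int) =>
        (List.range groups.length).foldl
          (fun st (g : Nat) => pvGroupStepA replicates ct ((g : Nat) : Int) st) st) st :=
    pvFoldl_ext _ _ _ (fun ct _ s => by rw [PySem.List.pyRange_zero_natCast, List.foldl_map])
  rw [hinner, PySem.List.pyRange_zero_natCast, List.foldl_map]
  rcases Nat.eq_zero_or_pos groups.length with hG0 | hGpos
  · simp only [hG0, Nat.cast_zero, mul_zero, List.range_zero, List.foldl_nil]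
    rw [PySem.List.pyRange_one_eq_nil (le_refl (0 : Int))]
    rw [pvFoldl_id _ _ (fun x _ s => rfl) _]
    rfl
  · rw [pvNested_eq_flat replicates groups.length hGpos cell_types.length]
    have hcast : ((cell_types.length : Int) * (groups.length : Int)) = ((cell_types.length * groups.length : Nat) : Int) := by push_cast; ring
    rw [hcast, PySem.List.pyRange_zero_natCast, List.foldl_map]
    have h := pvAflat_eq replicates groups.length (cell_types.length * groups.length)
      (List.replicate 96 (-1), List.replicate 96 (-1))
    have h00 : pvColIn 0 = 0 := rfl
    have h01 : pvRoIn replicates 0 = 0 := by unfold pvRoIn; norm_num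
    rw [h00, h01] at h
    rw [h]
    rfl
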